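-- pv_equiv track=rewrite | github.com/arhikit/algorithms_data_structure | 5.2.hashing_with_chains.py | process_requests
-- ===== SOURCE A (Python) =====
-- def process_requests(m, requests):
--
--     # getting hash from string str
--     def get_hash(str):
--
--         while len(powers_x) < len(str):
--             next_pow = (powers_x[-1] * x) % p
--             powers_x.append(next_pow)
--
--         rez = 0
--         for i, s in enumerate(str):
--             step = (ord(s) * powers_x[i]) % p
--             rez = (rez + step) % p
--
--         return rez % m
--
--     x = 263
--     p = 1000000007
--     powers_x = [1]
--
--     # output: results of "find" and "check" requests
--     output = []
--
--     # initialize the hash table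
--     hash_table = [[] for _ in range(m)]
--
--     # process requests
--     for req in requests:
--         operation, param = req[0], req[1]
--
--         # process the request "add string"
--         if operation == "add":
--             chain = hash_table[get_hash(param)]
--             if param not in chain:
--                 chain.append(param)
--
--         # process the request "del string"
--         elif operation == "del":
--             chain = hash_table[get_hash(param)]
--             if param in chain:
--                 chain.remove(param)
--
--         # process the request "find string"
--         elif operation == "find":
--             chain = hash_table[get_hash(param)]
--             output.append("yes" if param in chain else "no")
--
--         # process the request "check i"
--         elif operation == "check":
--             chain = hash_table[int(param)]
--             output.append(" ".join(reversed(chain)))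
--
--     return output
-- ===== SOURCE B (Python) =====
-- def process_requests(m, requests):
--     # No bucket table at all: one insertion-ordered dict maps each present
--     # string to its bucket index (hash computed once, at add time, by Horner);
--     # "check" answers by filtering the dict for that bucket.
--     x, p = 263, 1000000007
--     present = {}   # string -> bucket index, in insertion order
--     out = []
--     for op, param in requests:
--         if op == "add":
--             if param not in present:
--                 h = 0
--                 for ch in reversed(param):
--                     h = (h * x + ord(ch)) % p
--                 present[param] = h % m
--         elif op == "del":
--             present.pop(param, None)
--         elif op == "find":
--             out.append("yes" if param in present else "no")
--         elif op == "check":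
--             b = int(param) % m
--             out.append(" ".join(reversed([s for s, h in present.items() if h == b])))
--     return out
-- ===== Notes on version B (the rewrite author's own statement) =====
-- stated objective: alternative
-- what changed: B removes the m-bucket chaining table entirely: a single insertion-ordered dict maps each present string to its bucket index (hash computed once at add time by Horner's rule, never on del/find), membership and deletion are plain dict operations, and 'check' answers by filtering the dict for that bucket; Pre_ excludes exactly the inputs where A raises (m <= 0 with any handled request, or a 'check' parameter that is not an int literal or indexes outside [-m, m)).
import Mathlib
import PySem

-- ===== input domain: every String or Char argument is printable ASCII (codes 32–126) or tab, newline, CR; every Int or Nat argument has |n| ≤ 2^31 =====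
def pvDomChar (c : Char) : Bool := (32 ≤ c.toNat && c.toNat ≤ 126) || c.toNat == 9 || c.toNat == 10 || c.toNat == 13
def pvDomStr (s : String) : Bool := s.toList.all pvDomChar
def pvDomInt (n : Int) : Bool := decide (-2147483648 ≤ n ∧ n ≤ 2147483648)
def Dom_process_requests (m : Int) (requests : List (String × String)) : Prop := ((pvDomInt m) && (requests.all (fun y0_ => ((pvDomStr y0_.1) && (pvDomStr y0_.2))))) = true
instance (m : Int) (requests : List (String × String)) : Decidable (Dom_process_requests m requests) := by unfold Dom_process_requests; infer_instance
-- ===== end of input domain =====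

-- B drops A's m-bucket chaining table: one insertion-ordered dict maps each present string
-- to its bucket (Horner hash computed once at add time); "check" filters the dict (objective: alternative).


-- ===== PORT A =====

-- the 'while len(powers_x) < len(str)' extension loop of get_hash
def pvExtendPow (powers : List Int) (n : Nat) : List Int :=
  if _h : powers.length < n then
    pvExtendPow (powers ++ [PySem.Int.mod (PySem.List.pyGetD powers (-1) 0 * 263) 1000000007]) n
  else powers
termination_by n - powers.length
decreasing_by simp; omega

-- get_hash of A: extends the shared powers table, then sums ord(s[i])*x^i mod p;
-- returns the (mutated) powers table together with the hash value
def pvHashA (m : Int) (powers : List Int) (s : String) : List Int × Int :=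
  let powers' := pvExtendPow powers s.toList.length
  let rez := (PySem.List.enumerate s.toList 0).foldl
      (fun rez ic =>
        PySem.Int.mod (rez + PySem.Int.mod ((ic.2.toNat : Int) * PySem.List.pyGetD powers' ic.1 0) 1000000007) 1000000007)
      0
  (powers', PySem.Int.mod rez m)

-- one request of A's loop; state = (powers_x, hash_table, output)
def pvStepA (m : Int) (st : List Int × List (List String) × List String)
    (req : String × String) : List Int × List (List String) × List String :=
  let powers := st.1; let table := st.2.1; let output := st.2.2
  let operation := req.1; let param := req.2
  if operation = "add" then
    let r := pvHashA m powers param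
    let chain := PySem.List.pyGetD table r.2 []
    if param ∈ chain then (r.1, table, output)
    else (r.1, PySem.List.pySetD table r.2 (chain ++ [param]), output)
  else if operation = "del" then
    let r := pvHashA m powers param
    let chain := PySem.List.pyGetD table r.2 []
    if param ∈ chain then
      (r.1, PySem.List.pySetD table r.2 ((PySem.List.remove? chain param).getD chain), output)
    else (r.1, table, output)
  else if operation = "find" then
    let r := pvHashA m powers param
    let chain := PySem.List.pyGetD table r.2 []
    (r.1, table, output ++ [if param ∈ chain then "yes" else "no"])
  else if operation = "check" then
    let i := (PySem.Int.ofStr? param).getD 0   -- int(param); Pre_ guarantees it parses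
    let chain := PySem.List.pyGetD table i []
    (powers, table, output ++ [PySem.Str.join " " chain.reverse])
  else st

def process_requests (m : Int) (requests : List (String × String)) : List String :=
  let table := (PySem.List.pyRange 0 m 1).map (fun _ => ([] : List String))
  (requests.foldl (pvStepA m) ([1], table, [])).2.2

-- ===== PORT B =====

-- B's hash: Horner's rule over the reversed string, then mod m (computed only on "add")
def pvBucket (m : Int) (s : String) : Int :=
  PySem.Int.mod
    (s.toList.reverse.foldl
      (fun h c => PySem.Int.mod (h * 263 + (c.toNat : Int)) 1000000007) 0)
    m

-- one request of B's loop; state = (present dict, output)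
def pvStepB (m : Int) (st : PySem.Dict String Int × List String)
    (req : String × String) : PySem.Dict String Int × List String :=
  let d := st.1; let out := st.2
  let op := req.1; let param := req.2
  if op = "add" then
    if d.contains param then st
    else (d.insert param (pvBucket m param), out)
  else if op = "del" then
    (d.erase param, out)             -- present.pop(param, None)
  else if op = "find" then
    (d, out ++ [if d.contains param then "yes" else "no"])
  else if op = "check" then
    let b := PySem.Int.mod ((PySem.Int.ofStr? param).getD 0) m   -- int(param); Pre_ guarantees it parses
    (d, out ++ [PySem.Str.join " " (((d.items.filter (fun q => q.2 == b)).map Prod.fst).reverse)])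
  else st

def process_requests_alt (m : Int) (requests : List (String × String)) : List String :=
  (requests.foldl (pvStepB m) (PySem.Dict.empty, [])).2

-- ===== PRECONDITION & SPEC =====

def pvEff (r : String × String) : Bool :=
  r.1 == "add" || r.1 == "del" || r.1 == "find" || r.1 == "check"

-- Pre_ excludes exactly the inputs on which the Python A raises: m ≤ 0 together with at least
-- one add/del/find/check request (ZeroDivisionError in get_hash, or IndexError on the empty
-- table), and "check" requests whose parameter is not an int literal (ValueError) or whose
-- index lies outside [-m, m) (IndexError).
def Pre_process_requests (m : Int) (requests : List (String × String)) : Prop :=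
  (1 ≤ m ∨ requests.all (fun r => !pvEff r) = true) ∧
  ∀ r ∈ requests, r.1 = "check" →
    ((PySem.Int.ofStr? r.2).any (fun k => decide (-m ≤ k ∧ k < m))) = true
instance (m : Int) (requests : List (String × String)) : Decidable (Pre_process_requests m requests) := by
  unfold Pre_process_requests; infer_instance

def pvWitness_process_requests : Int × (List (String × String)) :=
  (2, [("add", "ab"), ("add", "c"), ("find", "ab"), ("del", "c"), ("check", "0"), ("check", "-1")])

def Spec_process_requests (m : Int) (requests : List (String × String)) (out : List String) : Prop := out = process_requests_alt m requests
instance (m : Int) (requests : List (String × String)) (out : List String) : Decidable (Spec_process_requests m requests out) := by unfold Spec_process_requests; infer_instance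

-- ===== CLAIM (what is proved, stated in full; the proofs are below) =====
def Claim_equal_process_requests : Prop := ∀ (m : Int) (requests : List (String × String)), Dom_process_requests m requests → Pre_process_requests m requests → Spec_process_requests m requests (process_requests m requests)

-- ===== LEMMAS AND PROOFS =====

theorem pvME (p a : Int) : Int.ModEq p (a % p) a := Int.emod_emod_of_dvd a dvd_rfl

-- the powers_x table is well formed: nonempty, entry i is x^i mod p
def PowOK (powers : List Int) : Prop :=
  0 < powers.length ∧ ∀ i (h : i < powers.length), powers[i] = 263 ^ i % 1000000007

-- reference value of the polynomial hash: sum of ord(cs[k]) * x^(j+k), no mod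
def pvRef (cs : List Char) (j : Nat) : Int :=
  match cs with
  | [] => 0
  | c :: cs => (c.toNat : Int) * 263 ^ j + pvRef cs (j + 1)

theorem pvRef_shift (cs : List Char) (j : Nat) : pvRef cs (j + 1) = 263 * pvRef cs j := by
  induction cs generalizing j with
  | nil => simp [pvRef]
  | cons c cs ih => simp only [pvRef, ih (j + 1)]; rw [pow_succ]; ring

theorem pvPowStep (powers : List Int) (h : PowOK powers) :
    PowOK (powers ++ [PySem.Int.mod (PySem.List.pyGetD powers (-1) 0 * 263) 1000000007]) := by
  obtain ⟨hpos, hval⟩ := h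
  have hne : powers ≠ [] := by intro hh; simp [hh] at hpos
  have hlast : PySem.List.pyGetD powers (-1) 0 = powers[powers.length - 1] := by
    rw [PySem.List.pyGetD_neg_one powers 0 hne, List.getLast_eq_getElem]
  refine ⟨by simp, ?_⟩
  intro i hi
  simp only [List.length_append, List.length_cons, List.length_nil] at hi
  rcases Nat.lt_or_ge i powers.length with hc | hc
  · rw [List.getElem_append_left hc]; exact hval i hc
  · have hie : i = powers.length := by omega
    subst hie
    have hg : (powers ++ [PySem.Int.mod (PySem.List.pyGetD powers (-1) 0 * 263) 1000000007])[powers.length]'(by simp)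
        = PySem.Int.mod (PySem.List.pyGetD powers (-1) 0 * 263) 1000000007 := by simp
    rw [hg, hlast, hval _ (by omega), PySem.Int.mod_eq_emod_of_pos (by norm_num)]
    have h263 : (263:Int) % 1000000007 = 263 := by norm_num
    conv_rhs => rw [show powers.length = (powers.length - 1) + 1 by omega, pow_succ, Int.mul_emod, h263]

theorem pvExtendPow_spec (powers : List Int) (n : Nat) (h : PowOK powers) :
    PowOK (pvExtendPow powers n) ∧ n ≤ (pvExtendPow powers n).length := by
  unfold pvExtendPow
  split
  case isTrue hlt => exact pvExtendPow_spec _ n (pvPowStep powers h)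
  case isFalse hge => exact ⟨h, by omega⟩
termination_by n - powers.length
decreasing_by simp; omega

theorem pvFoldA_eq (powers : List Int)
    (hpow : ∀ i (h : i < powers.length), powers[i] = 263 ^ i % 1000000007) :
    ∀ (cs : List Char) (j : Nat) (rez : Int), j + cs.length ≤ powers.length →
      (PySem.List.enumerate cs (j : Int)).foldl
        (fun rez ic =>
          PySem.Int.mod (rez + PySem.Int.mod ((ic.2.toNat : Int) * PySem.List.pyGetD powers ic.1 0) 1000000007) 1000000007)
        rez
      = (if cs = [] then rez else (rez + pvRef cs j) % 1000000007) := by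
  intro cs
  induction cs with
  | nil => intro j rez _; simp [PySem.List.enumerate_nil]
  | cons c cs ih =>
    intro j rez hlen
    rw [PySem.List.enumerate_cons]
    simp only [List.foldl_cons]
    have hj : ((j : Int) + 1) = ((j + 1 : Nat) : Int) := by push_cast; ring
    rw [hj, ih (j + 1) _ (by simp at hlen ⊢; omega)]
    have hget : PySem.List.pyGetD powers (j : Int) 0 = 263 ^ j % 1000000007 := by
      rw [PySem.List.pyGetD_natCast, List.getD_eq_getElem _ _ (by simp at hlen; omega)]
      exact hpow j (by simp at hlen; omega)
    rw [hget, PySem.Int.mod_eq_emod_of_pos (by norm_num), PySem.Int.mod_eq_emod_of_pos (by norm_num)]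
    have hstep : Int.ModEq 1000000007 (((c.toNat : Int) * (263 ^ j % 1000000007)) % 1000000007)
        ((c.toNat : Int) * 263 ^ j) :=
      (pvME _ _).trans ((Int.ModEq.refl _).mul (pvME _ _))
    by_cases hnil : cs = []
    · subst hnil
      rw [if_pos rfl, if_neg (by simp : ¬(([c] : List Char) = []))]
      have h2 : pvRef [c] j = (c.toNat : Int) * 263 ^ j := by simp [pvRef]
      rw [h2]
      exact (Int.ModEq.refl rez).add hstep
    · rw [if_neg hnil, if_neg (by simp : ¬((c :: cs : List Char) = []))]
      rw [Int.emod_add_emod]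
      rw [show pvRef (c :: cs) j = (c.toNat : Int) * 263 ^ j + pvRef cs (j + 1) from rfl]
      calc (rez + ((c.toNat : Int) * (263 ^ j % 1000000007)) % 1000000007 + pvRef cs (j + 1)) % 1000000007
          = (rez + ((c.toNat : Int) * 263 ^ j + pvRef cs (j + 1))) % 1000000007 := by
            have h1 : Int.ModEq 1000000007
                (rez + ((c.toNat : Int) * (263 ^ j % 1000000007)) % 1000000007 + pvRef cs (j + 1))
                (rez + ((c.toNat : Int) * 263 ^ j + pvRef cs (j + 1))) := by
              calc rez + ((c.toNat : Int) * (263 ^ j % 1000000007)) % 1000000007 + pvRef cs (j + 1)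
                  ≡ rez + (c.toNat : Int) * 263 ^ j + pvRef cs (j + 1) [ZMOD 1000000007] :=
                    ((Int.ModEq.refl rez).add hstep).add (Int.ModEq.refl _)
                _ = rez + ((c.toNat : Int) * 263 ^ j + pvRef cs (j + 1)) := by ring
            exact h1

theorem pvHornerB_eq (cs : List Char) :
    cs.reverse.foldl (fun h c => PySem.Int.mod (h * 263 + (c.toNat : Int)) 1000000007) 0
      = (if cs = [] then 0 else pvRef cs 0 % 1000000007) := by
  induction cs with
  | nil => simp
  | cons c cs ih =>
    simp only [List.reverse_cons, List.foldl_append, List.foldl_cons, List.foldl_nil, ih]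
    rw [PySem.Int.mod_eq_emod_of_pos (by norm_num)]
    by_cases hnil : cs = []
    · subst hnil
      rw [if_pos rfl, if_neg (by simp : ¬(([c] : List Char) = []))]
      have h2 : pvRef [c] 0 = (c.toNat : Int) := by simp [pvRef]
      rw [h2]; ring_nf
    · rw [if_neg hnil, if_neg (by simp : ¬((c :: cs : List Char) = []))]
      calc (pvRef cs 0 % 1000000007 * 263 + (c.toNat : Int)) % 1000000007
          = pvRef (c :: cs) 0 % 1000000007 := by
            have h1 : Int.ModEq 1000000007 ((pvRef cs 0 % 1000000007) * 263 + (c.toNat : Int))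
                (pvRef (c :: cs) 0) := by
              calc (pvRef cs 0 % 1000000007) * 263 + (c.toNat : Int)
                  ≡ pvRef cs 0 * 263 + (c.toNat : Int) [ZMOD 1000000007] :=
                    ((pvME _ _).mul (Int.ModEq.refl _)).add (Int.ModEq.refl _)
                _ = pvRef (c :: cs) 0 := by
                    show _ = (c.toNat : Int) * 263 ^ 0 + pvRef cs (0 + 1)
                    rw [pvRef_shift]; ring
            exact h1

-- A's hash equals B's bucket, and the extended powers table stays well formed
theorem pvHash_eq (m : Int) (powers : List Int) (s : String) (h : PowOK powers) :
    pvHashA m powers s = (pvExtendPow powers s.toList.length, pvBucket m s) := by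
  obtain ⟨hok, hlen⟩ := pvExtendPow_spec powers s.toList.length h
  unfold pvHashA pvBucket
  refine Prod.ext rfl ?_
  show PySem.Int.mod ((PySem.List.enumerate s.toList 0).foldl _ 0) m = PySem.Int.mod _ m
  congr 1
  have hA := pvFoldA_eq (pvExtendPow powers s.toList.length) hok.2 s.toList 0 0 (by omega)
  simp only [Nat.cast_zero] at hA
  rw [hA, pvHornerB_eq]
  by_cases hnil : s.toList = [] <;> simp [hnil]

-- the bucket-j chain that B's dict represents
def pvChain (d : PySem.Dict String Int) (j : Int) : List String :=
  (d.items.filter (fun q => q.2 == j)).map Prod.fst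

-- the simulation invariant between A's table and B's dict (for 1 ≤ m)
def pvInv (m : Int) (ta : List (List String)) (d : PySem.Dict String Int) : Prop :=
  ta.length = m.toNat ∧ d.keys.Nodup ∧
  (∀ q ∈ d.items, q.2 = pvBucket m q.1) ∧
  (∀ j : Nat, j < ta.length → ta.getD j [] = pvChain d (j : Int))

theorem pvMem_chain (d : PySem.Dict String Int) (j : Int) (s : String) :
    s ∈ pvChain d j ↔ ∃ h, (s, h) ∈ d.items ∧ h = j := by
  unfold pvChain
  simp only [List.mem_map, List.mem_filter]
  constructor
  · rintro ⟨⟨a, b⟩, ⟨hmem, hb⟩, rfl⟩; exact ⟨b, hmem, by simpa using hb⟩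
  · rintro ⟨h, hmem, hj⟩; exact ⟨(s, h), ⟨hmem, by simp [hj]⟩, rfl⟩

-- membership in the bucket of s's own hash ↔ key membership in the dict
theorem pvMem_iff (m : Int) (d : PySem.Dict String Int)
    (hh : ∀ q ∈ d.items, q.2 = pvBucket m q.1) (s : String) :
    s ∈ pvChain d (pvBucket m s) ↔ d.contains s = true := by
  rw [pvMem_chain, PySem.Dict.contains_iff_mem_keys]
  constructor
  · rintro ⟨h, hmem, rfl⟩
    exact PySem.Dict.mem_keys_of_mem_items d hmem
  · intro hk
    simp only [PySem.Dict.keys, List.mem_map] at hk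
    obtain ⟨⟨a, b⟩, hmem, rfl⟩ := hk
    exact ⟨b, hmem, hh _ hmem⟩

theorem pvChain_nodup (d : PySem.Dict String Int) (j : Int) (hnd : d.keys.Nodup) :
    (pvChain d j).Nodup := by
  refine List.Nodup.sublist ?_ hnd
  exact List.Sublist.map Prod.fst List.filter_sublist

theorem pvChain_insert (d : PySem.Dict String Int) (s : String) (h j : Int)
    (hnc : d.contains s = false) :
    pvChain (d.insert s h) j = pvChain d j ++ (if h = j then [s] else []) := by
  unfold pvChain
  rw [PySem.Dict.items_insert_of_not_contains d h hnc, List.filter_append, List.map_append]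
  by_cases he : h = j <;> simp [he]

theorem pvChain_erase (d : PySem.Dict String Int) (s : String) (j : Int)
    (hnd : d.keys.Nodup) :
    pvChain (d.erase s) j = (pvChain d j).erase s := by
  rw [List.Nodup.erase_eq_filter (pvChain_nodup d j hnd) s]
  unfold pvChain PySem.Dict.erase
  rw [List.filter_filter, List.filter_map, List.filter_filter]
  congr 1
  apply List.filter_congr
  intro q _
  rw [Bool.and_comm]; rfl

theorem pvErase_not_contains (d : PySem.Dict String Int) (s : String)
    (h : d.contains s = false) : d.erase s = d := by
  apply PySem.Dict.ext
  show d.items.filter _ = d.items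
  rw [List.filter_eq_self]
  intro q hq
  simp only [PySem.Dict.contains, List.any_eq_false] at h
  simp [h q hq]

theorem pvBucket_range (m : Int) (hm : 1 ≤ m) (s : String) :
    0 ≤ pvBucket m s ∧ pvBucket m s < m :=
  ⟨PySem.Int.mod_nonneg _ (by omega), PySem.Int.mod_lt _ (by omega)⟩

-- A's lookup at a "check" index equals the lookup at the Python-mod bucket
theorem pvIdx (ta : List (List String)) (m k : Int) (hm : 1 ≤ m)
    (hlen : ta.length = m.toNat) (h1 : -m ≤ k) (h2 : k < m) :
    PySem.List.pyGetD ta k [] = ta.getD (PySem.Int.mod k m).toNat [] ∧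
    (PySem.Int.mod k m).toNat < ta.length := by
  have hmod : PySem.Int.mod k m = k % m := PySem.Int.mod_eq_emod_of_pos (by omega)
  by_cases hk : 0 ≤ k
  · have hke : k % m = k := Int.emod_eq_of_lt hk h2
    have hb : k.toNat < ta.length := by omega
    rw [hmod, hke, PySem.List.pyGetD_eq_getElem ta [] hk (by omega),
      List.getD_eq_getElem ta [] hb]
    exact ⟨rfl, hb⟩
  · have hke : k % m = k + m := by
      have := Int.add_mul_emod_self_left (a := k) (b := m) (c := 1)
      simp only [mul_one] at this
      rw [← this, Int.emod_eq_of_lt (by omega) (by omega)]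
    set kk := (-k).toNat with hkk
    have hk0 : 0 < kk := by omega
    have hkl : kk ≤ ta.length := by omega
    have hkeq : k = -(kk : Int) := by omega
    have hb : (k + m).toNat < ta.length := by omega
    rw [hmod, hke, hkeq, PySem.List.pyGetD_neg_natCast ta kk [] hk0 hkl,
      List.getD_eq_getElem ta [] (by omega : ((-(kk:Int)) + m).toNat < ta.length)]
    constructor
    · congr 1; omega
    · omega

-- one request preserves PowOK and the invariant, and appends the same output
theorem pvStep_rel (m : Int) (hm : 1 ≤ m) (powers : List Int) (ta : List (List String))
    (out : List String) (d : PySem.Dict String Int) (req : String × String)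
    (hp : PowOK powers) (hinv : pvInv m ta d)
    (hchk : req.1 = "check" →
      ((PySem.Int.ofStr? req.2).any (fun k => decide (-m ≤ k ∧ k < m))) = true) :
    PowOK (pvStepA m (powers, ta, out) req).1 ∧
    pvInv m (pvStepA m (powers, ta, out) req).2.1 (pvStepB m (d, out) req).1 ∧
    (pvStepB m (d, out) req).2 = (pvStepA m (powers, ta, out) req).2.2 := by
  obtain ⟨hlen, hnd, hh, hbuck⟩ := hinv
  rcases req with ⟨op, param⟩
  have hhash := pvHash_eq m powers param hp
  have hok := (pvExtendPow_spec powers param.toList.length hp).1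
  have hrange := pvBucket_range m hm param
  have hb0 := hrange.1
  have hblt : (pvBucket m param).toNat < ta.length := by omega
  have hchain : PySem.List.pyGetD ta (pvBucket m param) [] = pvChain d (pvBucket m param) := by
    rw [PySem.List.pyGetD_eq_getElem ta [] hrange.1 (by omega),
      ← List.getD_eq_getElem ta [] hblt, hbuck _ hblt]
    congr 1; omega
  have hmemiff := pvMem_iff m d hh param
  by_cases hop : op = "add"
  · subst hop
    simp only [pvStepA, pvStepB, hhash, String.reduceEq, reduceIte, hchain]
    by_cases hin : param ∈ pvChain d (pvBucket m param)
    · rw [if_pos hin, if_pos (hmemiff.mp hin)]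
      exact ⟨hok, ⟨hlen, hnd, hh, hbuck⟩, rfl⟩
    · have hnc : d.contains param = false := by
        cases hcv : d.contains param
        · rfl
        · exact absurd (hmemiff.mpr hcv) hin
      rw [if_neg hin, if_neg (by simp [hnc])]
      refine ⟨hok, ⟨by simp [PySem.List.length_pySetD, hlen], ?_, ?_, ?_⟩, rfl⟩
      · rw [PySem.Dict.keys_insert_of_not_contains d (pvBucket m param) hnc]
        exact List.Nodup.append hnd (by simp)
          (by intro a ha hb
              simp only [List.mem_singleton] at hb; subst hb
              exact absurd ((PySem.Dict.contains_iff_mem_keys d a).mpr ha) (by simp [hnc]))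
      · intro q hq
        rw [PySem.Dict.items_insert_of_not_contains d _ hnc] at hq
        rcases List.mem_append.mp hq with hq | hq
        · exact hh q hq
        · simp only [List.mem_singleton] at hq; subst hq; rfl
      · intro j hj
        rw [PySem.List.length_pySetD] at hj
        rw [PySem.List.pySetD_of_nonneg ta _ hrange.1, List.getD_eq_getElem?_getD,
          List.getElem?_set, pvChain_insert d param (pvBucket m param) j hnc]
        by_cases hbj : pvBucket m param = (j : Int)
        · have h1 : (pvBucket m param).toNat = j := by omega
          rw [if_pos h1, if_pos hblt, Option.getD_some, if_pos hbj, hbj]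
        · have h1 : ¬(pvBucket m param).toNat = j := by omega
          rw [if_neg h1, if_neg hbj, ← List.getD_eq_getElem?_getD, hbuck j hj,
            List.append_nil]
  · by_cases hop2 : op = "del"
    · subst hop2
      simp only [pvStepA, pvStepB, hhash, String.reduceEq, reduceIte, hchain]
      by_cases hin : param ∈ pvChain d (pvBucket m param)
      · rw [if_pos hin,
          PySem.List.remove?_eq_some_erase _ param hin, Option.getD_some]
        refine ⟨hok, ⟨by simp [PySem.List.length_pySetD, hlen], ?_, ?_, ?_⟩, rfl⟩
        · show (d.erase param).keys.Nodup
          exact List.Nodup.sublist (List.Sublist.map Prod.fst List.filter_sublist) hnd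
        · intro q hq
          exact hh q (List.mem_of_mem_filter hq)
        · intro j hj
          rw [PySem.List.length_pySetD] at hj
          rw [PySem.List.pySetD_of_nonneg ta _ hrange.1, List.getD_eq_getElem?_getD,
            List.getElem?_set, pvChain_erase d param (j : Int) hnd]
          by_cases hbj : pvBucket m param = (j : Int)
          · have h1 : (pvBucket m param).toNat = j := by omega
            rw [if_pos h1, if_pos hblt, Option.getD_some, hbj]
          · have h1 : ¬(pvBucket m param).toNat = j := by omega
            rw [if_neg h1, ← List.getD_eq_getElem?_getD, hbuck j hj]
            have hnm : param ∉ pvChain d (j : Int) := by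
              intro hc
              obtain ⟨hv, hmem, hvj⟩ := (pvMem_chain d (j : Int) param).mp hc
              exact hbj ((hh _ hmem).symm.trans hvj)
            rw [List.erase_of_not_mem hnm]
      · have hnc : d.contains param = false := by
          cases hcv : d.contains param
          · rfl
          · exact absurd (hmemiff.mpr hcv) hin
        rw [if_neg hin, pvErase_not_contains d param hnc]
        exact ⟨hok, ⟨hlen, hnd, hh, hbuck⟩, rfl⟩
    · by_cases hop3 : op = "find"
      · subst hop3
        simp only [pvStepA, pvStepB, hhash, String.reduceEq, reduceIte, hchain]
        refine ⟨hok, ⟨hlen, hnd, hh, hbuck⟩, ?_⟩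
        by_cases hin : param ∈ pvChain d (pvBucket m param)
        · rw [if_pos hin, if_pos (hmemiff.mp hin)]
        · have hnc : d.contains param = false := by
            cases hcv : d.contains param
            · rfl
            · exact absurd (hmemiff.mpr hcv) hin
          simp [hin, hnc]
      · by_cases hop4 : op = "check"
        · subst hop4
          obtain ⟨k, hk, hkb⟩ : ∃ k, PySem.Int.ofStr? param = some k ∧
              decide (-m ≤ k ∧ k < m) = true := by
            rcases hcv : PySem.Int.ofStr? param with _ | k
            · rw [hcv] at hchk; simp [Option.any] at hchk
            · exact ⟨k, rfl, by have := hchk rfl; rwa [hcv] at this⟩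
          simp only [decide_eq_true_eq] at hkb
          simp only [pvStepA, pvStepB, String.reduceEq, reduceIte, hk, Option.getD_some]
          obtain ⟨hga, hbl⟩ := pvIdx ta m k hm hlen hkb.1 hkb.2
          refine ⟨hp, ⟨hlen, hnd, hh, hbuck⟩, ?_⟩
          have hcast : (((PySem.Int.mod k m).toNat : Nat) : Int) = PySem.Int.mod k m := by
            have := PySem.Int.mod_nonneg k (b := m) (by omega)
            omega
          rw [hga, List.getD_eq_getElem ta [] hbl, ← List.getD_eq_getElem ta [] hbl,
            hbuck _ hbl, hcast]
          rfl
        · simp only [pvStepA, pvStepB, if_neg hop, if_neg hop2, if_neg hop3, if_neg hop4]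
          exact ⟨hp, ⟨hlen, hnd, hh, hbuck⟩, trivial⟩

theorem pvLoop_eq (m : Int) (hm : 1 ≤ m) :
    ∀ (reqs : List (String × String)) (powers : List Int) (ta : List (List String))
      (out : List String) (d : PySem.Dict String Int),
      PowOK powers → pvInv m ta d →
      (∀ r ∈ reqs, r.1 = "check" →
        ((PySem.Int.ofStr? r.2).any (fun k => decide (-m ≤ k ∧ k < m))) = true) →
      (reqs.foldl (pvStepA m) (powers, ta, out)).2.2
        = (reqs.foldl (pvStepB m) (d, out)).2 := by
  intro reqs
  induction reqs with
  | nil => intro powers ta out d _ _ _; rfl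
  | cons req reqs ih =>
    intro powers ta out d hp hinv hchk
    obtain ⟨h1, h2, h3⟩ := pvStep_rel m hm powers ta out d req hp hinv (hchk req (by simp))
    simp only [List.foldl_cons]
    rw [show pvStepA m (powers, ta, out) req
        = ((pvStepA m (powers, ta, out) req).1, (pvStepA m (powers, ta, out) req).2.1,
           (pvStepA m (powers, ta, out) req).2.2) from rfl,
      show pvStepB m (d, out) req
        = ((pvStepB m (d, out) req).1, (pvStepB m (d, out) req).2) from rfl, h3]
    exact ih (pvStepA m (powers, ta, out) req).1 (pvStepA m (powers, ta, out) req).2.1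
      (pvStepA m (powers, ta, out) req).2.2 (pvStepB m (d, out) req).1 h1 h2
      (fun r hr => hchk r (by simp [hr]))

-- with no effective request, both loops leave their state unchanged
theorem pvNoop_A (m : Int) (reqs : List (String × String))
    (h : reqs.all (fun r => !pvEff r) = true) (st : List Int × List (List String) × List String) :
    reqs.foldl (pvStepA m) st = st := by
  induction reqs generalizing st with
  | nil => rfl
  | cons req reqs ih =>
    simp only [List.all_cons, Bool.and_eq_true] at h
    have he := h.1
    simp only [pvEff, Bool.not_eq_true', Bool.or_eq_false_iff, beq_eq_false_iff_ne] at he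
    simp only [List.foldl_cons, pvStepA,
      if_neg he.1.1.1, if_neg he.1.1.2, if_neg he.1.2, if_neg he.2]
    exact ih h.2 st

theorem pvNoop_B (m : Int) (reqs : List (String × String))
    (h : reqs.all (fun r => !pvEff r) = true) (st : PySem.Dict String Int × List String) :
    reqs.foldl (pvStepB m) st = st := by
  induction reqs generalizing st with
  | nil => rfl
  | cons req reqs ih =>
    simp only [List.all_cons, Bool.and_eq_true] at h
    have he := h.1
    simp only [pvEff, Bool.not_eq_true', Bool.or_eq_false_iff, beq_eq_false_iff_ne] at he
    simp only [List.foldl_cons, pvStepB,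
      if_neg he.1.1.1, if_neg he.1.1.2, if_neg he.1.2, if_neg he.2]
    exact ih h.2 st

-- ===== VERDICT (by name: the statement is the Claim_ definition above) =====
theorem process_requests_spec : Claim_equal_process_requests := by
  intro m requests _ hpre
  obtain ⟨hm, hchk⟩ := hpre
  unfold Spec_process_requests process_requests process_requests_alt
  show (requests.foldl (pvStepA m)
      ([1], (PySem.List.pyRange 0 m 1).map (fun _ => ([] : List String)), [])).2.2
    = (requests.foldl (pvStepB m) (PySem.Dict.empty, [])).2
  rcases hm with hm | hnoop
  · refine pvLoop_eq m hm requests [1] _ [] PySem.Dict.empty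
      ⟨by simp, by intro i hi; simp at hi; subst hi; simp⟩
      ⟨?_, ?_, ?_, ?_⟩
      (fun r hr hc => hchk r hr hc)
    · simp [PySem.List.length_pyRange_one]
    · exact PySem.Dict.nodup_keys_empty
    · intro q hq; simp [PySem.Dict.empty] at hq
    · intro j hj
      simp only [List.length_map] at hj
      rw [List.getD_eq_getElem _ [] (by simpa using hj), List.getElem_map]
      simp [pvChain, PySem.Dict.empty]
  · rw [pvNoop_A m requests hnoop, pvNoop_B m requests hnoop]
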